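-- pv_equiv track=rewrite | github.com/waynegraham/ocr-analysis | ocr/runner.py | _infer_segment2page_from_pages
-- ===== SOURCE A (Python) =====
-- from typing import Dict, Any, List, Optional
--
-- def _infer_segment2page_from_pages(segments: List[str], pages: List[Dict[str, str]]) -> List[Optional[int]]:
--     """
--     Heuristic: for each segment, find the first page whose text contains a short probe of the segment.
--     Returns a list of page indices (or None) of same length as segments.
--     """
--     if not segments or not pages:
--         return [None] * len(segments)
--
--     # pre-normalize page text
--     norm_pages = []
--     for p in pages:
--         txt = " ".join((p.get("text") or "").split()).lower()
--         norm_pages.append(txt)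
--
--     seg2page: List[Optional[int]] = []
--     for seg in segments:
--         needle = " ".join((seg or "").split()).lower()
--         if not needle:
--             seg2page.append(None)
--             continue
--         probe = needle[:120]  # limit for speed and tolerance
--         found = None
--         for i, hay in enumerate(norm_pages):
--             if probe and probe in hay:
--                 found = i
--                 break
--         seg2page.append(found)
--     return seg2page
-- ===== SOURCE B (Python) =====
-- from typing import Dict, Any, List, Optional
--
-- def _infer_segment2page_from_pages(segments: List[str], pages: List[Dict[str, str]]) -> List[Optional[int]]:
--     """Page-major single pass: normalize each page once and resolve all still-unmatched
--     segment probes against it, instead of rescanning the pages for every segment."""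
--     def norm(t):
--         return " ".join((t or "").split()).lower()
--
--     probes = [norm(seg)[:120] or None for seg in segments]
--     result: List[Optional[int]] = [None] * len(segments)
--     for i, page in enumerate(pages):
--         hay = norm(page.get("text"))
--         result = [r if r is not None else (i if (p is not None and p in hay) else None)
--                   for r, p in zip(result, probes)]
--     return result
-- ===== Notes on version B (the rewrite author's own statement) =====
-- stated objective: alternative
-- what changed: B inverts the traversal: instead of A's segment-major scan that rescans the page list for every segment, B precomputes all probes, then makes one page-major pass, normalizing each page once and filling in every still-unmatched segment's index against that page.
import Mathlib
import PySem

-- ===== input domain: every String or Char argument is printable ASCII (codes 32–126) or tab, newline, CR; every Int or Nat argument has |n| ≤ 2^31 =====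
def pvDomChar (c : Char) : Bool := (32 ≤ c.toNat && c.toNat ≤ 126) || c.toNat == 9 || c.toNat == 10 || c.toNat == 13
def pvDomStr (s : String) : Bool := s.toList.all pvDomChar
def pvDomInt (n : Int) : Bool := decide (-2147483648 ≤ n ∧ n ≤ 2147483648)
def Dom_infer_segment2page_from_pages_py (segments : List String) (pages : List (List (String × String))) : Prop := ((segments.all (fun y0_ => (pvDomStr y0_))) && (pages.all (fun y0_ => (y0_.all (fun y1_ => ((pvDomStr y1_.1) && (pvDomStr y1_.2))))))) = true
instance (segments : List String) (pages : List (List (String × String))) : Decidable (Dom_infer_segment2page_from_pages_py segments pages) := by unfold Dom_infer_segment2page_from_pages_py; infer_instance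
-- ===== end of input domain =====

-- B re-traverses the data page-major (one pass over the pages, resolving all still-unmatched
-- segment probes against each page) instead of A's segment-major rescans; same return value, no speed claim.

-- ' " ".join((t or "").split()).lower() ' — shared verbatim by both Pythons
def pvNorm (t : String) : String :=
  PySem.Str.lower (PySem.Str.join " " (PySem.Str.split₀ t))

-- ===== PORT A =====
-- 'for i, hay in enumerate(norm_pages): if probe and probe in hay: found = i; break'
def pvFindA (probe : String) : List String → Int → Option Int
  | [], _ => none
  | hay :: rest, i =>
      if probe ≠ "" ∧ PySem.Str.isIn probe hay = true then some i
      else pvFindA probe rest (i + 1)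

def infer_segment2page_from_pages_py (segments : List String) (pages : List (List (String × String))) : List (Option Int) :=
  if segments = [] ∨ pages = [] then segments.map (fun _ => none)
  else
    let norm_pages := pages.map (fun p => pvNorm ((PySem.Dict.get? (PySem.Dict.mk p) "text").getD ""))
    segments.map (fun seg =>
      let needle := pvNorm seg
      if needle = "" then none
      else pvFindA (PySem.Str.slice needle none (some 120)) norm_pages 0)

-- ===== PORT B =====
-- 'norm(seg)[:120] or None' for each segment
def pvProbesB (segments : List String) : List (Option String) :=
  segments.map (fun seg =>
    let p := PySem.Str.slice (pvNorm seg) none (some 120)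
    if p = "" then none else some p)

-- one element of the list comprehension: 'r if r is not None else (i if (p is not None and p in hay) else None)'
def pvStepB (i : Int) (hay : String) (r : Option Int) (p : Option String) : Option Int :=
  match r with
  | some v => some v
  | none =>
    match p with
    | some pr => if PySem.Str.isIn pr hay = true then some i else none
    | none => none

-- 'for i, page in enumerate(pages): hay = norm(page.get("text")); result = [... for r, p in zip(result, probes)]'
def pvLoopB (probes : List (Option String)) : List (List (String × String)) → Int → List (Option Int) → List (Option Int)
  | [], _, res => res
  | page :: rest, i, res =>
      pvLoopB probes rest (i + 1)
        (List.zipWith (pvStepB i (pvNorm ((PySem.Dict.get? (PySem.Dict.mk page) "text").getD ""))) res probes)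

def infer_segment2page_from_pages_py_alt (segments : List String) (pages : List (List (String × String))) : List (Option Int) :=
  pvLoopB (pvProbesB segments) pages 0 (segments.map (fun _ => none))

-- ===== PRECONDITION & SPEC =====
def Spec_infer_segment2page_from_pages_py (segments : List String) (pages : List (List (String × String))) (out : List (Option Int)) : Prop := out = infer_segment2page_from_pages_py_alt segments pages
instance (segments : List String) (pages : List (List (String × String))) (out : List (Option Int)) : Decidable (Spec_infer_segment2page_from_pages_py segments pages out) := by unfold Spec_infer_segment2page_from_pages_py; infer_instance

-- ===== CLAIM (what is proved, stated in full; the proofs are below) =====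
def Claim_equal_infer_segment2page_from_pages_py : Prop := ∀ (segments : List String) (pages : List (List (String × String))), Dom_infer_segment2page_from_pages_py segments pages → Spec_infer_segment2page_from_pages_py segments pages (infer_segment2page_from_pages_py segments pages)

-- ===== LEMMAS AND PROOFS =====

-- first page index (from i) whose normalized text contains pr — the common spec of both scans
def pvFirst (pr : String) : List String → Int → Option Int
  | [], _ => none
  | hay :: rest, i =>
      if PySem.Str.isIn pr hay = true then some i else pvFirst pr rest (i + 1)

theorem pvFindA_eq_pvFirst (probe : String) (hp : probe ≠ "") :
    ∀ (hays : List String) (i : Int), pvFindA probe hays i = pvFirst probe hays i := by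
  intro hays
  induction hays with
  | nil => intro i; rfl
  | cons h t ih =>
      intro i
      simp only [pvFindA, pvFirst, hp, ne_eq, not_false_iff, true_and, ih]

-- one page of B's pass, merged with the first-match over the remaining pages,
-- is the first-match over all pages
theorem pvStep_or (i : Int) (hay : String) (r : Option Int) (p : Option String) (tl : List String) :
    (pvStepB i hay r p).or (p.bind fun pr => pvFirst pr tl (i + 1))
      = r.or (p.bind fun pr => pvFirst pr (hay :: tl) i) := by
  cases r with
  | some v => rfl
  | none =>
      cases p with
      | none => rfl
      | some pr =>
          simp only [pvStepB, pvFirst, Option.bind_some, Option.none_or]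
          split_ifs with h
          · rfl
          · simp

theorem zipWith_keep (f : Option Int → Option String → Option Int)
    (hf : ∀ r p, f r p = r) :
    ∀ (res : List (Option Int)) (probes : List (Option String)),
      res.length = probes.length → List.zipWith f res probes = res := by
  intro res
  induction res with
  | nil => intro probes _; rfl
  | cons r t ih =>
      intro probes hl
      cases probes with
      | nil => simp at hl
      | cons p ps =>
          simp only [List.zipWith, hf]
          rw [ih ps (by simpa using hl)]

theorem zipWith_fuse (f g : Option Int → Option String → Option Int) :
    ∀ (res : List (Option Int)) (probes : List (Option String)),
      List.zipWith f (List.zipWith g res probes) probes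
        = List.zipWith (fun r p => f (g r p) p) res probes := by
  intro res
  induction res with
  | nil => intro probes; rfl
  | cons r t ih =>
      intro probes
      cases probes with
      | nil => rfl
      | cons p ps => simp only [List.zipWith, ih]

theorem zipWith_self {α β : Type} (f : α → α → β) :
    ∀ (l : List α), List.zipWith f l l = l.map (fun x => f x x) := by
  intro l
  induction l with
  | nil => rfl
  | cons x t ih => simp only [List.zipWith, List.map, ih]

theorem pvLoopB_spec (probes : List (Option String)) :
    ∀ (pages : List (List (String × String))) (i : Int) (res : List (Option Int)),
      res.length = probes.length →
      pvLoopB probes pages i res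
        = List.zipWith
            (fun r p? => r.or (p?.bind (fun pr =>
                pvFirst pr (pages.map (fun p => pvNorm ((PySem.Dict.get? (PySem.Dict.mk p) "text").getD ""))) i)))
            res probes := by
  intro pages
  induction pages with
  | nil =>
      intro i res hl
      simp only [pvLoopB, List.map]
      rw [zipWith_keep _ (fun r p => by cases r <;> cases p <;> rfl) res probes hl]
  | cons page rest ih =>
      intro i res hl
      simp only [pvLoopB]
      rw [ih (i + 1) _ (by simp [List.length_zipWith]; omega), zipWith_fuse]
      simp only [List.map_cons, pvStep_or]

theorem probe_ne_of_needle_ne (needle : String) (hn : needle ≠ "") :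
    PySem.Str.slice needle none (some 120) ≠ "" := by
  intro h
  have hl : (PySem.Str.slice needle none (some 120)).toList = [] := by
    rw [h]; rfl
  have hn' : needle.toList ≠ [] := fun hc => hn (String.toList_eq_nil_iff.mp hc)
  rw [PySem.Str.toList_slice, PySem.Chars.slice_eq_listSlice] at hl
  rw [show (120:Int) = ((120:Nat):Int) from by norm_num, PySem.List.slice_to_natCast] at hl
  rcases List.exists_cons_of_ne_nil hn' with ⟨c, t, hct⟩
  simp [hct] at hl

-- ===== VERDICT (by name: the statement is the Claim_ definition above) =====
set_option maxHeartbeats 1000000 in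
theorem infer_segment2page_from_pages_py_spec : Claim_equal_infer_segment2page_from_pages_py := by
  intro segments pages _
  unfold Spec_infer_segment2page_from_pages_py
  unfold infer_segment2page_from_pages_py infer_segment2page_from_pages_py_alt
  rw [pvLoopB_spec (pvProbesB segments) pages 0 _ (by simp [pvProbesB])]
  unfold pvProbesB
  rw [List.zipWith_map, zipWith_self]
  split_ifs with hnil
  · rcases hnil with h | h
    · subst h
      simp only [List.map_nil]
    · subst h
      apply List.map_congr_left
      intro seg _
      cases hpr : (if PySem.Str.slice (pvNorm seg) none (some 120) = "" then (none : Option String)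
          else some (PySem.Str.slice (pvNorm seg) none (some 120))) with
      | none => simp
      | some pr => simp [pvFirst]
  · apply List.map_congr_left
    intro seg _
    by_cases hne : pvNorm seg = ""
    · have hs : PySem.Str.slice "" none (some 120) = "" := by decide
      simp [hne, hs]
    · have hp := probe_ne_of_needle_ne (pvNorm seg) hne
      simp only [if_neg hne, if_neg hp, Option.bind_some, Option.none_or,
        pvFindA_eq_pvFirst _ hp]
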